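-- pv_equiv track=rewrite | github.com/Ben-lin-yi/Ben | Beitou_DCD_Build_Tool_v2.4.py | change_version
-- ===== SOURCE A (Python) =====
-- def change_version(file_ver):
--     if file_ver:
--         inf_ver_list = file_ver.split(".")
--         inf_ver_list_shouji = []
--         driver_ver = ""
--         for i in inf_ver_list:
--             if len(i) > 1 and i[0] == '0':
--                 inf_ver_list_shouji.append(i[1:])
--             else:
--                 inf_ver_list_shouji.append(i)
--         else:
--             driver_ver = ".".join(inf_ver_list_shouji)
--         if driver_ver:
--             return driver_ver
--         else:
--             return False
-- ===== SOURCE B (Python) =====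
-- def change_version(file_ver):
--     # Single left-to-right scan: drop a '0' that stands at the start of a
--     # component and is followed by a non-dot character; no split/join.
--     if not file_ver:
--         return None
--     out = []
--     n = len(file_ver)
--     start = True  # at the start of a dot-separated component
--     for i in range(n):
--         c = file_ver[i]
--         if start and c == '0' and i + 1 < n and file_ver[i + 1] != '.':
--             start = False
--             continue
--         out.append(c)
--         start = (c == '.')
--     return ''.join(out)
-- ===== Notes on version B (the rewrite author's own statement) =====
-- stated objective: alternative
-- what changed: replaces split-into-components / per-component strip loop / join with a single character scan over the whole string that drops a leading zero of a component in place, using a one-character lookahead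
import Mathlib
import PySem

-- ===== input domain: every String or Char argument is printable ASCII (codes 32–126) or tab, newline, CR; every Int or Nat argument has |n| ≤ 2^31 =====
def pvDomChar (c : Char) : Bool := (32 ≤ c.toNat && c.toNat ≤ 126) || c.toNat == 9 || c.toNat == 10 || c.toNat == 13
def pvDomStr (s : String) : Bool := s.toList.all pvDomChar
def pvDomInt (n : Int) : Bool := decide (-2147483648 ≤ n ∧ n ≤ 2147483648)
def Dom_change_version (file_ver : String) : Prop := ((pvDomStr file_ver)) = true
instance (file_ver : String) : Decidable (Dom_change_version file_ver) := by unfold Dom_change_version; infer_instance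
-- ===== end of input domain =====

-- B replaces split/strip-loop/join with a single character scan (one-char lookahead); same return value.
-- ===== PORT A =====
-- literal port of A: split on ".", strip one leading '0' from components with len > 1, join with ".".
def change_version (file_ver : String) : Option String :=
  if file_ver.toList = [] then none          -- 'if file_ver:' false -> implicit None
  else
    -- sep "." is nonempty, so Python's split never raises: split? is always 'some'
    let inf_ver_list : List String := (PySem.Str.split? file_ver ".").getD []
    let inf_ver_list_shouji : List String :=
      inf_ver_list.foldl (fun acc i =>
        if 1 < PySem.Str.len i ∧ PySem.Str.pyGet? i 0 = some '0'
        then acc ++ [PySem.Str.slice i (some 1) none]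
        else acc ++ [i]) []
    let driver_ver : String := PySem.Str.join "." inf_ver_list_shouji
    if driver_ver.toList = [] then none      -- Python returns False here; unreachable for a nonempty input string
    else some driver_ver

-- ===== PORT B =====
-- the scan of Source B: 'start' = at component start; lookahead at the next character via the tail
def altGo : Bool → List Char → List Char
  | _, [] => []
  | start, c :: rest =>
    if start && (c == '0') && (match rest with | r :: _ => !(r == '.') | [] => false)
    then altGo false rest
    else c :: altGo (c == '.') rest

def change_version_alt (file_ver : String) : Option String :=
  if file_ver.toList = [] then none
  else some (String.ofList (altGo true file_ver.toList))

-- ===== PRECONDITION & SPEC =====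
def Spec_change_version (file_ver : String) (out : Option String) : Prop := out = change_version_alt file_ver
instance (file_ver : String) (out : Option String) : Decidable (Spec_change_version file_ver out) := by unfold Spec_change_version; infer_instance

-- ===== CLAIM (what is proved, stated in full; the proofs are below) =====
def Claim_equal_change_version : Prop := ∀ (file_ver : String), Dom_change_version file_ver → Spec_change_version file_ver (change_version file_ver)

-- ===== LEMMAS AND PROOFS =====



-- ===== proof helpers =====

-- structural (fuel-free) version of PySem.Chars.splitOn for a single-dot separator
def splitDotAux : List Char → List Char → List (List Char)
  | [], cur => [cur.reverse]
  | c :: rest, cur => if c = '.' then cur.reverse :: splitDotAux rest [] else splitDotAux rest (c :: cur)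

-- the per-component strip A performs, on the char level
def stripA (x : List Char) : List Char :=
  if 1 < x.length ∧ x[0]? = some '0' then x.tail else x

theorem go_spec (l : List Char) : ∀ (fuel : Nat) (cur : List Char) (acc : List (List Char)),
    l.length ≤ fuel →
    PySem.Chars.splitOn.go ['.'] fuel l cur acc = acc.reverse ++ splitDotAux l cur := by
  induction l with
  | nil =>
    intro fuel cur acc _
    cases fuel <;> simp [PySem.Chars.splitOn.go, splitDotAux]
  | cons c rest ih =>
    intro fuel cur acc h
    cases fuel with
    | zero => simp at h
    | succ f =>
      by_cases hc : c = '.'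
      · subst hc
        have hp : List.isPrefixOf ['.'] ('.' :: rest) = true := by simp [List.isPrefixOf]
        simp only [PySem.Chars.splitOn.go, hp, if_true, List.length_cons, List.length_nil,
          List.drop_succ_cons, List.drop_zero]
        rw [ih f [] (cur.reverse :: acc) (by simpa using Nat.le_of_succ_le_succ h)]
        simp [splitDotAux]
      · have hp : List.isPrefixOf ['.'] (c :: rest) = false := by
          simp [List.isPrefixOf]; exact fun h' => absurd h'.symm hc
        simp only [PySem.Chars.splitOn.go, hp, Bool.false_eq_true, if_false]
        rw [ih f (c :: cur) acc (by simpa using Nat.le_of_succ_le_succ h)]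
        simp [splitDotAux, hc]

theorem splitOn_eq (cs : List Char) : PySem.Chars.splitOn cs ['.'] = splitDotAux cs [] := by
  have := go_spec cs (cs.length + 1) [] [] (by omega)
  simpa [PySem.Chars.splitOn] using this

theorem altGo_false_nodot (a : List Char) (h : '.' ∉ a) : altGo false a = a := by
  induction a with
  | nil => rfl
  | cons c rest ih =>
    simp only [List.mem_cons, not_or] at h
    have hc : (c == '.') = false := by simpa using fun hx => h.1 hx.symm
    simp [altGo, hc, ih h.2]

theorem altGo_false_app (a b : List Char) (h : '.' ∉ a) :
    altGo false (a ++ '.' :: b) = a ++ '.' :: altGo true b := by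
  induction a with
  | nil => simp [altGo]
  | cons c rest ih =>
    simp only [List.mem_cons, not_or] at h
    have hc : (c == '.') = false := by simpa using fun hx => h.1 hx.symm
    simp [altGo, hc, ih h.2]

theorem altGo_true_nodot (a : List Char) (h : '.' ∉ a) : altGo true a = stripA a := by
  cases a with
  | nil => rfl
  | cons c rest =>
    simp only [List.mem_cons, not_or] at h
    by_cases hc : c = '0'
    · subst hc
      cases rest with
      | nil => simp [altGo, stripA]
      | cons r rest' =>
        have hr : (r == '.') = false := by
          simpa using fun hx => h.2 (by simp [hx])
        have h2' : '.' ∉ rest' := fun hx => h.2 (by simp [hx])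
        simp [altGo, hr, stripA, altGo_false_nodot _ h2']
    · have hc' : (c == '0') = false := by simpa using hc
      simp [altGo, hc', stripA, hc,
        show (c == '.') = false by simpa using fun hx => h.1 hx.symm,
        altGo_false_nodot _ h.2]

theorem altGo_true_app (a b : List Char) (h : '.' ∉ a) :
    altGo true (a ++ '.' :: b) = stripA a ++ '.' :: altGo true b := by
  cases a with
  | nil => simp [altGo, stripA]
  | cons c rest =>
    simp only [List.mem_cons, not_or] at h
    by_cases hc : c = '0'
    · subst hc
      cases rest with
      | nil => simp [altGo, stripA]
      | cons r rest' =>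
        have hr : (r == '.') = false := by
          simpa using fun hx => h.2 (by simp [hx])
        have h2' : '.' ∉ rest' := fun hx => h.2 (by simp [hx])
        simp [altGo, hr, stripA, altGo_false_app _ b h2']
    · have hc' : (c == '0') = false := by simpa using hc
      simp [altGo, hc', stripA, hc,
        show (c == '.') = false by simpa using fun hx => h.1 hx.symm,
        altGo_false_app _ b h.2]

theorem splitDotAux_nodot (a : List Char) : ∀ cur, '.' ∉ a → splitDotAux a cur = [cur.reverse ++ a] := by
  induction a with
  | nil => intro cur _; simp [splitDotAux]
  | cons c rest ih =>
    intro cur h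
    simp only [List.mem_cons, not_or] at h
    have : ¬ c = '.' := fun hc => h.1 hc.symm
    simp [splitDotAux, this, ih (c :: cur) h.2]

theorem splitDotAux_app (a b : List Char) : ∀ cur, '.' ∉ a →
    splitDotAux (a ++ '.' :: b) cur = (cur.reverse ++ a) :: splitDotAux b [] := by
  induction a with
  | nil => intro cur _; simp [splitDotAux]
  | cons c rest ih =>
    intro cur h
    simp only [List.mem_cons, not_or] at h
    have : ¬ c = '.' := fun hc => h.1 hc.symm
    simp [splitDotAux, this, ih (c :: cur) h.2]

theorem splitDotAux_ne_nil (cs cur : List Char) : splitDotAux cs cur ≠ [] := by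
  cases cs with
  | nil => simp [splitDotAux]
  | cons c rest =>
    by_cases h : c = '.'
    · simp [splitDotAux, h]
    · simp only [splitDotAux, if_neg h]
      exact splitDotAux_ne_nil rest _

theorem join_strip (cs : List Char) :
    PySem.Chars.join ['.'] ((splitDotAux cs []).map stripA) = altGo true cs := by
  have hdec := List.takeWhile_append_dropWhile (p := fun c => !(c == '.')) (l := cs)
  set a := cs.takeWhile (fun c => !(c == '.')) with ha
  set d := cs.dropWhile (fun c => !(c == '.')) with hd
  have hna : '.' ∉ a := by
    intro hmem
    have := List.mem_takeWhile_imp (ha ▸ hmem)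
    simp at this
  cases hdd : d with
  | nil =>
    rw [← hdec, hdd, List.append_nil]
    rw [splitDotAux_nodot a [] hna]
    rw [altGo_true_nodot a hna]
    simp [PySem.Chars.join, List.intercalate]
  | cons e b =>
    have he : e = '.' := by
      have := List.head?_dropWhile_not (p := fun c => !(c == '.')) (l := cs)
      rw [← hd, hdd] at this
      simpa using this
    subst he
    rw [← hdec, hdd]
    rw [splitDotAux_app a b [] hna, altGo_true_app a b hna]
    obtain ⟨y, ys, hys⟩ : ∃ y ys, splitDotAux b [] = y :: ys := by
      cases hx : splitDotAux b [] with
      | nil => exact absurd hx (splitDotAux_ne_nil b [])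
      | cons y ys => exact ⟨y, ys, rfl⟩
    have hrec : PySem.Chars.join ['.'] ((splitDotAux b []).map stripA) = altGo true b :=
      join_strip b
    rw [hys] at hrec
    rw [hys]
    simp only [List.map_cons, List.reverse_nil, List.nil_append]
    rw [PySem.Chars.join_cons_cons]
    rw [List.map_cons] at hrec
    rw [hrec]
    simp
termination_by cs.length
decreasing_by
  have : d.length ≤ cs.length := hd ▸ List.length_dropWhile_le _ _
  simp [hdd] at this
  omega

theorem altGo_ne_nil (cs : List Char) : ∀ b, cs ≠ [] → altGo b cs ≠ [] := by
  induction cs with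
  | nil => intro b h; exact absurd rfl h
  | cons c rest ih =>
    intro b _
    cases rest with
    | nil => simp [altGo]
    | cons r rest' =>
      by_cases hcond : (b && (c == '0') && !(r == '.')) = true
      · simp only [altGo]
        rw [if_pos hcond]
        exact ih false (by simp)
      · simp only [altGo]
        rw [if_neg hcond]
        simp

theorem f_toList (x : List Char) :
    (if 1 < PySem.Str.len (String.ofList x) ∧ PySem.Str.pyGet? (String.ofList x) 0 = some '0'
     then PySem.Str.slice (String.ofList x) (some 1) none
     else String.ofList x).toList = stripA x := by
  have hlen : PySem.Str.len (String.ofList x) = (x.length : Int) := by simp [PySem.Str.len]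
  have hget : PySem.Str.pyGet? (String.ofList x) 0 = x[0]? := by
    simp [PySem.Str.pyGet?, PySem.Chars.pyGet?]
    simpa using PySem.List.pyGet?_zero (xs := x)
  by_cases hc : 1 < x.length ∧ x[0]? = some '0'
  · rw [if_pos (by rw [hlen, hget]; exact ⟨by exact_mod_cast hc.1, hc.2⟩)]
    rw [stripA, if_pos hc, PySem.Str.toList_slice]
    simp only [PySem.Chars.slice]
    have : (String.ofList x).toList = x := by simp
    rw [this]
    simpa using PySem.List.slice_from_one (xs := x)
  · rw [if_neg (by rw [hlen, hget]; intro h; exact hc ⟨by exact_mod_cast h.1, h.2⟩)]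
    rw [stripA, if_neg hc]
    simp

theorem change_version_main (s : String) (hs : ¬ s.toList = []) :
    change_version s = change_version_alt s := by
  unfold change_version change_version_alt
  rw [if_neg hs, if_neg hs]
  have hsplit : PySem.Str.split? s "." =
      some ((PySem.Chars.splitOn s.toList ['.']).map String.ofList) := by
    simp [PySem.Str.split?, PySem.Chars.split?]
  simp only [hsplit, Option.getD_some]
  have hfun : (fun (acc : List String) (i : String) =>
      if 1 < PySem.Str.len i ∧ PySem.Str.pyGet? i 0 = some '0'
      then acc ++ [PySem.Str.slice i (some 1) none] else acc ++ [i])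
      = fun acc i => acc ++ [if 1 < PySem.Str.len i ∧ PySem.Str.pyGet? i 0 = some '0'
                             then PySem.Str.slice i (some 1) none else i] := by
    funext acc i
    split_ifs <;> rfl
  rw [hfun]
  rw [PySem.List.foldl_append_singleton_eq_map
    (fun i => if 1 < PySem.Str.len i ∧ PySem.Str.pyGet? i 0 = some '0'
              then PySem.Str.slice i (some 1) none else i)]
  simp only [List.nil_append]
  have hmap : ((((PySem.Chars.splitOn s.toList ['.']).map String.ofList).map
      (fun i => if 1 < PySem.Str.len i ∧ PySem.Str.pyGet? i 0 = some '0'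
                then PySem.Str.slice i (some 1) none else i)).map String.toList)
      = (PySem.Chars.splitOn s.toList ['.']).map stripA := by
    simp only [List.map_map]
    exact List.map_congr_left (fun x _ => f_toList x)
  have hdrv : (PySem.Str.join "."
      (((PySem.Chars.splitOn s.toList ['.']).map String.ofList).map
        (fun i => if 1 < PySem.Str.len i ∧ PySem.Str.pyGet? i 0 = some '0'
                  then PySem.Str.slice i (some 1) none else i))).toList
      = altGo true s.toList := by
    rw [PySem.Str.toList_join, show ".".toList = ['.'] from rfl, hmap, splitOn_eq, join_strip]
  rw [if_neg (by rw [hdrv]; exact altGo_ne_nil s.toList true hs)]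
  exact congrArg some (String.toList_inj.mp (by rw [hdrv]; simp))

-- ===== VERDICT (by name: the statement is the Claim_ definition above) =====
theorem change_version_spec : Claim_equal_change_version := by
  intro s _
  unfold Spec_change_version
  by_cases hs : s.toList = []
  · unfold change_version change_version_alt
    rw [if_pos hs, if_pos hs]
  · exact change_version_main s hs
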